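-- pv_equiv track=rewrite | github.com/Rakeshnelli/codemind-python | Absolute_difference.py | product_of_primes_and_non_primes
-- ===== SOURCE A (Python) =====
-- def is_prime(num):
--     if num < 2:
--         return False
--     for i in range(2, int(num**0.5) + 1):
--         if num % i == 0:
--             return False
--     return True
--
-- def product_of_primes_and_non_primes(arr):
--     product_non_primes = 1
--     product_primes = 1
--
--     for num in arr:
--         if is_prime(num):
--             product_primes *= num
--         else:
--             product_non_primes *= num
--
--     return abs(product_non_primes - product_primes)
-- ===== SOURCE B (Python) =====
-- def is_prime(num):
--     if num < 2:
--         return False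
--     for i in range(2, int(num**0.5) + 1):
--         if num % i == 0:
--             return False
--     return True
--
-- def product_of_primes_and_non_primes(arr):
--     # Partition by primality, then reduce each group, instead of one fused pass.
--     primes = [x for x in arr if is_prime(x)]
--     non_primes = [x for x in arr if not is_prime(x)]
--     return abs(prod(non_primes) - prod(primes))
--
-- def prod(xs):
--     r = 1
--     for x in xs:
--         r *= x
--     return r
-- ===== Notes on version B (the rewrite author's own statement) =====
-- stated objective: alternative
-- what changed: Replaces the single fused loop carrying two running products with a partition of the list by primality into two lists followed by a separate product fold over each.
import Mathlib
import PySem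

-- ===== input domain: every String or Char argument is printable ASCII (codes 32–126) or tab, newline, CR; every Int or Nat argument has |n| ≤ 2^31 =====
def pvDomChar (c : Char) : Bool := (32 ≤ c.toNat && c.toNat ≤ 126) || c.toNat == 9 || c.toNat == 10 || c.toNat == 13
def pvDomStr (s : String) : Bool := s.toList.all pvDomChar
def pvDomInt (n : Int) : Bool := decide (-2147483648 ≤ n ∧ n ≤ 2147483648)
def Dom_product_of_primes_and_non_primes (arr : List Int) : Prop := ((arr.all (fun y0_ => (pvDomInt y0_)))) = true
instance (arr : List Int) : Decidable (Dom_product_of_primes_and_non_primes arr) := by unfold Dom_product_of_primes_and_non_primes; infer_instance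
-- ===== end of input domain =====

-- B partitions the list by primality and folds a product over each group, instead of
-- A's single fused loop carrying two running products; equal return values on all inputs.

-- ===== PORT A =====
-- is_prime, shared verbatim by both Pythons. int(num**0.5) is ported as Nat.sqrt,
-- which is exact for the 2 ≤ num ≤ 2^31 values that reach it on Dom (checked numerically).
def isPrime (num : Int) : Bool :=
  if num < 2 then false
  else (PySem.List.pyRange 2 ((Nat.sqrt num.toNat : Int) + 1) 1).all
    (fun i => !(PySem.Int.mod num i == 0))

def product_of_primes_and_non_primes (arr : List Int) : Int :=
  let st := arr.foldl
    (fun (acc : Int × Int) num =>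
      if isPrime num then (acc.1, acc.2 * num) else (acc.1 * num, acc.2))
    (1, 1)
  |st.1 - st.2|

-- ===== PORT B =====
def prodInt (xs : List Int) : Int := xs.foldl (fun r x => r * x) 1

def product_of_primes_and_non_primes_alt (arr : List Int) : Int :=
  let primes := arr.filter (fun x => isPrime x)
  let nonPrimes := arr.filter (fun x => !(isPrime x))
  |prodInt nonPrimes - prodInt primes|

-- ===== PRECONDITION & SPEC =====
def Spec_product_of_primes_and_non_primes (arr : List Int) (out : Int) : Prop := out = product_of_primes_and_non_primes_alt arr
instance (arr : List Int) (out : Int) : Decidable (Spec_product_of_primes_and_non_primes arr out) := by unfold Spec_product_of_primes_and_non_primes; infer_instance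

-- ===== CLAIM (what is proved, stated in full; the proofs are below) =====
def Claim_equal_product_of_primes_and_non_primes : Prop := ∀ (arr : List Int), Dom_product_of_primes_and_non_primes arr → Spec_product_of_primes_and_non_primes arr (product_of_primes_and_non_primes arr)

-- ===== LEMMAS AND PROOFS =====
lemma foldl_mul_shift (xs : List Int) (a : Int) :
    xs.foldl (fun r x => r * x) a = a * xs.foldl (fun r x => r * x) 1 := by
  induction xs generalizing a with
  | nil => simp
  | cons y ys ih =>
    simp only [List.foldl_cons]
    rw [ih (a * y), ih (1 * y)]
    ring

lemma prodInt_cons (x : Int) (xs : List Int) : prodInt (x :: xs) = x * prodInt xs := by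
  simp only [prodInt, List.foldl_cons, one_mul]
  exact foldl_mul_shift xs x

lemma fold_eq_partition (arr : List Int) (a b : Int) :
    arr.foldl
      (fun (acc : Int × Int) num =>
        if isPrime num then (acc.1, acc.2 * num) else (acc.1 * num, acc.2))
      (a, b)
    = (a * prodInt (arr.filter (fun x => !(isPrime x))),
       b * prodInt (arr.filter (fun x => isPrime x))) := by
  induction arr generalizing a b with
  | nil => simp [prodInt]
  | cons x xs ih =>
    simp only [List.foldl_cons, List.filter_cons]
    by_cases h : isPrime x <;>
      · simp only [h, Bool.not_true, Bool.not_false, if_true, if_false,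
          Bool.false_eq_true, ih, prodInt_cons]
        simp [mul_assoc]

-- ===== VERDICT (by name: the statement is the Claim_ definition above) =====
theorem product_of_primes_and_non_primes_spec : Claim_equal_product_of_primes_and_non_primes := by
  intro arr _
  unfold Spec_product_of_primes_and_non_primes product_of_primes_and_non_primes
    product_of_primes_and_non_primes_alt
  rw [fold_eq_partition]
  simp
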